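-- pv_equiv track=rewrite | github.com/hanbinchoi/algorithms_practice | wtest/7.py | getRightResult
-- ===== SOURCE A (Python) =====
-- def getRightResult(result):
--     answer = []
--     k = 1
--
--     for i in range(0, len(result), 2):
--         cnt = 2 * (k) - 1
--         r = i
--         c = 0
--         line = ""
--         check = True
--         while cnt != 0:
--             line += result[r][c]
--             cnt -= 1
--             if check:
--                 r -= 1
--                 check = False
--             else:
--                 c += 1
--                 check = True
--
--         answer.append(line)
--         k += 1
--     return answer
-- ===== SOURCE B (Python) =====
-- def getRightResult(result):
--     answer = []
--     for i in range(0, len(result), 2):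
--         # two plain diagonal scans, then a zip-merge
--         down = [result[i - c][c] for c in range(i // 2 + 1)]
--         up = [result[i - 1 - c][c] for c in range(i // 2)]
--         answer.append(down[0] + "".join(u + d for u, d in zip(up, down[1:])))
--     return answer
-- ===== Notes on version B (the rewrite author's own statement) =====
-- stated objective: alternative
-- what changed: A walks each line with a single stateful zig-zag cursor (mutable r/c, a check toggle and a cnt countdown in a while-loop); B builds each line from two independent plain diagonal scans (the start-row diagonal and the one above it) and merges them with zip, so no traversal state exists.
import Mathlib
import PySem

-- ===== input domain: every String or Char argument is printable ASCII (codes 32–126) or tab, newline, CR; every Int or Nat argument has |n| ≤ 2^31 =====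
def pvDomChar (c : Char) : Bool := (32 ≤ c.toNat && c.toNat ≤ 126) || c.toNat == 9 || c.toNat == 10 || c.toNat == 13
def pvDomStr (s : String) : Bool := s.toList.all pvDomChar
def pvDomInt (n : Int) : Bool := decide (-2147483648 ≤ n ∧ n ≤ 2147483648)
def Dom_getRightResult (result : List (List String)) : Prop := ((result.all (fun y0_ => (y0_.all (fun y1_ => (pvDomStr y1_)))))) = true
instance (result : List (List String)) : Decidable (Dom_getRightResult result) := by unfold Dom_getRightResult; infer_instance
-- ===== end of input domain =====

-- B replaces A's stateful zig-zag walk (r/c/check toggle in a while-loop) by two staged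
-- diagonal scans per line (down-right and the one above it) merged with a zip
-- (objective: simpler; return value only).

-- ===== PORT A =====
-- the while-loop: cnt counts down, r/c/check are the mutated locals, line accumulates
def pvGoA (result : List (List String)) : Nat → Int → Int → Bool → String → String
  | 0, _, _, _, line => line
  | Nat.succ n, r, c, check, line =>
    let line := line ++ PySem.List.pyGetD (PySem.List.pyGetD result r []) c ""
    if check then pvGoA result n (r - 1) c false line
    else pvGoA result n r (c + 1) true line

def getRightResult (result : List (List String)) : List String :=
  ((PySem.List.pyRange 0 (result.length : Int) 2).foldl
    (fun (st : List String × Int) i =>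
      let cnt : Int := 2 * st.2 - 1
      let line := pvGoA result cnt.toNat i 0 true ""
      (st.1 ++ [line], st.2 + 1))
    ([], 1)).1

-- ===== PORT B =====
-- down/up are the two diagonal comprehensions; down[1:] with a nonnegative start is List.drop 1 (exact)
def getRightResult_alt (result : List (List String)) : List String :=
  (PySem.List.pyRange 0 (result.length : Int) 2).map (fun i =>
    let down := (PySem.List.pyRange 0 (PySem.Int.floordiv i 2 + 1) 1).map (fun c =>
      PySem.List.pyGetD (PySem.List.pyGetD result (i - c) []) c "")
    let up := (PySem.List.pyRange 0 (PySem.Int.floordiv i 2) 1).map (fun c =>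
      PySem.List.pyGetD (PySem.List.pyGetD result (i - 1 - c) []) c "")
    PySem.List.pyGetD down 0 "" ++
      PySem.Str.join "" ((up.zip (down.drop 1)).map (fun p => p.1 ++ p.2)))

-- ===== PRECONDITION & SPEC =====
-- Pre_: every cell the diagonal walk reads exists (otherwise the Python raises IndexError).
def Pre_getRightResult (result : List (List String)) : Prop :=
  ∀ i ∈ PySem.List.pyRange 0 (result.length : Int) 2,
    ∀ j ∈ PySem.List.pyRange 0 (i + 1) 1,
      PySem.Raise.InRange
        (PySem.List.pyGetD result (i - PySem.Int.floordiv (j + 1) 2) []).length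
        (PySem.Int.floordiv j 2)
instance (result : List (List String)) : Decidable (Pre_getRightResult result) := by
  unfold Pre_getRightResult; infer_instance

def pvWitness_getRightResult : List (List String) := [["a"], ["b", "c"], ["d"]]

def Spec_getRightResult (result : List (List String)) (out : List String) : Prop := out = getRightResult_alt result
instance (result : List (List String)) (out : List String) : Decidable (Spec_getRightResult result out) := by unfold Spec_getRightResult; infer_instance

-- ===== CLAIM (what is proved, stated in full; the proofs are below) =====
def Claim_equal_getRightResult : Prop := ∀ (result : List (List String)), Dom_getRightResult result → Pre_getRightResult result → Spec_getRightResult result (getRightResult result)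

-- ===== LEMMAS AND PROOFS =====

-- ''.join at the char level is flatten
theorem pvJoinNil (ps : List (List Char)) : PySem.Chars.join [] ps = ps.flatten := by
  induction ps with
  | nil => simp [PySem.Chars.join_nil]
  | cons p rest ih =>
    cases rest with
    | nil => simp [PySem.Chars.join, List.intercalate]
    | cons q rest' => simp [PySem.Chars.join_cons_cons, ih]

-- the characters of the j-th step of the walk, in closed form
def pvCellL (result : List (List String)) (i : Int) (j : Nat) : List Char :=
  (PySem.List.pyGetD (PySem.List.pyGetD result (i - (((j : Int) + 1) / 2)) [])
    (((j : Int)) / 2) "").toList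

-- the walk, characterized: starting at step j with fuel m it appends cells j, j+1, ..., j+m-1
theorem pvGoA_toList (result : List (List String)) (i : Int) :
    ∀ (m j : Nat) (line : String),
      (pvGoA result m (i - (((j : Int) + 1) / 2)) ((j : Int) / 2) (j % 2 == 0) line).toList
        = line.toList ++ ((List.range' j m).map (pvCellL result i)).flatten := by
  intro m
  induction m with
  | zero => intro j line; simp [pvGoA]
  | succ n ih =>
    intro j line
    rw [List.range'_succ]
    by_cases hj : j % 2 = 0
    · have h4 : (j % 2 == 0) = true := by simp [hj]
      simp only [pvGoA, h4, if_true]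
      have key := ih (j + 1)
        (line ++ PySem.List.pyGetD (PySem.List.pyGetD result (i - (((j : Int) + 1) / 2)) []) ((j : Int) / 2) "")
      have e1 : i - ((((j + 1 : Nat) : Int) + 1) / 2) = i - (((j : Int) + 1) / 2) - 1 := by push_cast; omega
      have e2 : (((j + 1 : Nat) : Int)) / 2 = (j : Int) / 2 := by push_cast; omega
      have e3 : ((j + 1) % 2 == 0) = false := by simp; omega
      rw [e1, e2, e3] at key
      rw [key]
      simp [pvCellL, String.toList_append]
    · have h4 : (j % 2 == 0) = false := by simp; omega
      simp only [pvGoA, h4, Bool.false_eq_true, if_false]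
      have key := ih (j + 1)
        (line ++ PySem.List.pyGetD (PySem.List.pyGetD result (i - (((j : Int) + 1) / 2)) []) ((j : Int) / 2) "")
      have e1 : i - ((((j + 1 : Nat) : Int) + 1) / 2) = i - (((j : Int) + 1) / 2) := by push_cast; omega
      have e2 : (((j + 1 : Nat) : Int)) / 2 = (j : Int) / 2 + 1 := by push_cast; omega
      have e3 : ((j + 1) % 2 == 0) = true := by simp; omega
      rw [e1, e2, e3] at key
      rw [key]
      simp [pvCellL, String.toList_append]

-- pairing a flatten over the odd range 0..2n into head + pairs (odd, even)
theorem pvPairFlat (f : Nat → List Char) (n : Nat) :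
    ((List.range' 0 (2*n+1)).map f).flatten
      = f 0 ++ ((List.range n).map (fun c => f (2*c+1) ++ f (2*c+2))).flatten := by
  induction n with
  | zero => simp
  | succ m ih =>
    have h1 : 2*(m+1)+1 = (2*m+1) + 1 + 1 := by ring
    rw [h1, List.range'_concat, List.range'_concat, List.range_succ]
    simp only [List.map_append, List.flatten_append, List.map_cons, List.map_nil,
      List.flatten_cons, List.flatten_nil, List.append_nil, ih]
    simp [List.append_assoc]

-- A's line for row i = 2t equals B's zip-merged pair of diagonals
theorem pvLine_eq (result : List (List String)) (t : Nat) :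
    pvGoA result (2*t+1) ((2*t : Nat) : Int) 0 true ""
      = (let down := (PySem.List.pyRange 0 (PySem.Int.floordiv ((2*t : Nat) : Int) 2 + 1) 1).map (fun c =>
            PySem.List.pyGetD (PySem.List.pyGetD result (((2*t : Nat) : Int) - c) []) c "")
         let up := (PySem.List.pyRange 0 (PySem.Int.floordiv ((2*t : Nat) : Int) 2) 1).map (fun c =>
            PySem.List.pyGetD (PySem.List.pyGetD result (((2*t : Nat) : Int) - 1 - c) []) c "")
         PySem.List.pyGetD down 0 "" ++
           PySem.Str.join "" ((up.zip (down.drop 1)).map (fun p => p.1 ++ p.2))) := by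
  have hfd : PySem.Int.floordiv ((2*t : Nat) : Int) 2 = (t : Int) := by
    rw [PySem.Int.floordiv_eq_ediv_of_pos (by omega)]; omega
  simp only [hfd]
  -- the two diagonals as maps over Nat ranges
  have hr1 : PySem.List.pyRange 0 ((t : Int) + 1) 1
      = (List.range (t+1)).map (fun k : Nat => (k : Int)) := by
    rw [PySem.List.pyRange_one]
    rw [show (((t : Int) + 1) - 0).toNat = t + 1 by omega]
    apply List.map_congr_left; intro k _; simp
  have hr2 : PySem.List.pyRange 0 ((t : Int)) 1
      = (List.range t).map (fun k : Nat => (k : Int)) := by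
    rw [PySem.List.pyRange_one]
    rw [show (((t : Int)) - 0).toNat = t by omega]
    apply List.map_congr_left; intro k _; simp
  rw [hr1, hr2]
  set h : Nat → String := fun c =>
    PySem.List.pyGetD (PySem.List.pyGetD result (((2*t : Nat) : Int) - (c : Int)) []) (c : Int) "" with hh
  set g : Nat → String := fun c =>
    PySem.List.pyGetD (PySem.List.pyGetD result (((2*t : Nat) : Int) - 1 - (c : Int)) []) (c : Int) "" with hg
  have hdown : ((List.range (t+1)).map (fun k : Nat => (k : Int))).map (fun c =>
        PySem.List.pyGetD (PySem.List.pyGetD result (((2*t : Nat) : Int) - c) []) c "")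
      = h 0 :: (List.range t).map (fun c => h (c+1)) := by
    rw [List.map_map, List.range_succ_eq_map, List.map_cons, List.map_map]
    rfl
  have hup : ((List.range t).map (fun k : Nat => (k : Int))).map (fun c =>
        PySem.List.pyGetD (PySem.List.pyGetD result (((2*t : Nat) : Int) - 1 - c) []) c "")
      = (List.range t).map g := by
    rw [List.map_map]; rfl
  simp only [hdown, hup, List.drop_succ_cons, List.drop_zero,
    PySem.List.pyGetD_zero_cons]
  rw [List.zip_map']
  rw [← String.toList_inj]
  -- left side: the walk's characterization
  have h0 := pvGoA_toList result (2 * (t : Int)) (2*t+1) 0 ""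
  norm_num at h0
  rw [show ((2*t : Nat) : Int) = 2 * (t : Int) by push_cast; ring]
  rw [h0, pvPairFlat (pvCellL result (2 * (t : Int))) t]
  -- right side: the join as a flatten
  simp only [String.toList_append, List.map_map, PySem.Str.join,
    String.toList_ofList, String.toList_empty]
  rw [pvJoinNil]
  congr 1
  congr 1
  apply List.map_congr_left
  intro c _
  simp only [Function.comp, pvCellL, String.toList_append, hg, hh]
  push_cast
  have e1 : 2 * (t : Int) - (2 * (c : Int) + 1 + 1) / 2 = 2 * (t : Int) - 1 - (c : Int) := by omega
  have e2 : (2 * (c : Int) + 1) / 2 = (c : Int) := by omega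
  have e3 : 2 * (t : Int) - (2 * (c : Int) + 2 + 1) / 2 = 2 * (t : Int) - ((c : Int) + 1) := by omega
  have e4 : (2 * (c : Int) + 2) / 2 = (c : Int) + 1 := by omega
  rw [e1, e2, e3, e4]

-- the outer for-loop as a fold over range', with the k-counter made explicit
theorem pvFold_spec (result : List (List String)) :
    ∀ (T s : Nat) (ans : List String),
      (((List.range' s T).map (fun t => ((2 * t : Nat) : Int))).foldl
        (fun (st : List String × Int) i =>
          let cnt : Int := 2 * st.2 - 1
          let line := pvGoA result cnt.toNat i 0 true ""
          (st.1 ++ [line], st.2 + 1))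
        (ans, (s : Int) + 1))
      = (ans ++ (List.range' s T).map (fun t =>
            pvGoA result (2 * t + 1) ((2 * t : Nat) : Int) 0 true ""),
         ((s : Int) + T + 1)) := by
  intro T
  induction T with
  | zero => intro s ans; simp
  | succ n ih =>
    intro s ans
    rw [List.range'_succ]
    simp only [List.map_cons, List.foldl_cons]
    have hc : (2 * ((s : Int) + 1) - 1).toNat = 2 * s + 1 := by omega
    have hinit : (s : Int) + 1 + 1 = ((s + 1 : Nat) : Int) + 1 := by push_cast; ring
    rw [hc, hinit]
    rw [ih (s + 1) (ans ++ [pvGoA result (2 * s + 1) ((2 * s : Nat) : Int) 0 true ""])]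
    refine Prod.ext ?_ ?_
    · simp
    · push_cast; ring

theorem getRightResult_eq (result : List (List String)) :
    getRightResult result = getRightResult_alt result := by
  unfold getRightResult getRightResult_alt
  rw [PySem.List.pyRange_of_pos 0 (result.length : Int) (by norm_num)]
  have hmap : (List.range (if (0 : Int) < (result.length : Int)
          then (((result.length : Int) - 0 + 2 - 1) / 2).toNat else 0)).map
        (fun k : Nat => (0 : Int) + 2 * (k : Int))
      = (List.range' 0 (if (0 : Int) < (result.length : Int)
          then (((result.length : Int) - 0 + 2 - 1) / 2).toNat else 0)).map
        (fun t : Nat => ((2 * t : Nat) : Int)) := by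
    rw [← List.range_eq_range']
    apply List.map_congr_left
    intro k _
    push_cast; ring
  rw [hmap]
  have hfold := pvFold_spec result (if (0 : Int) < (result.length : Int)
      then (((result.length : Int) - 0 + 2 - 1) / 2).toNat else 0) 0 []
  simp only [Nat.cast_zero, zero_add, List.nil_append] at hfold
  rw [hfold]
  rw [List.map_map]
  apply List.map_congr_left
  intro t _
  simpa using pvLine_eq result t

-- ===== VERDICT (by name: the statement is the Claim_ definition above) =====
theorem getRightResult_spec : Claim_equal_getRightResult := by
  intro result _ _
  unfold Spec_getRightResult
  exact getRightResult_eq result
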